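-- pv_equiv track=rewrite | github.com/renatovico/kmap | src/kllm/optimizer.py | _expand_implicant
-- ===== SOURCE A (Python) =====
-- def _expand_implicant(value: int, mask: int, n_vars: int) -> set[int]:
--     """Expand implicant (value, care_mask) to all covered minterms.
--
--     Don't-care positions (0 in mask) can be 0 or 1.
--     """
--     dc_bits = [i for i in range(n_vars) if not (mask & (1 << i))]
--     base = value & mask
--     minterms = set()
--     for combo in range(1 << len(dc_bits)):
--         m = base
--         for j, bit_pos in enumerate(dc_bits):
--             if combo & (1 << j):
--                 m |= 1 << bit_pos
--         minterms.add(m)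
--     return minterms
-- ===== SOURCE B (Python) =====
-- def _expand_implicant(value: int, mask: int, n_vars: int) -> set[int]:
--     """Expand implicant (value, care_mask) to all covered minterms.
--
--     Iterative doubling: one pass over the bit positions, duplicating the
--     partial list for every don't-care bit instead of re-decoding each combo.
--     """
--     minterms = [value & mask]
--     for i in range(n_vars):
--         if not (mask & (1 << i)):
--             bit = 1 << i
--             minterms += [m | bit for m in minterms]
--     return set(minterms)
-- ===== Notes on version B (the rewrite author's own statement) =====
-- stated objective: alternative
-- what changed: Instead of enumerating all 2^k combos and re-decoding each combo's bits in an inner loop over the k don't-care positions, B makes one pass over the bit positions and doubles the partial minterm list at each don't-care bit, producing the same minterms in the same order (O(n + 2^k) work vs A's O(n + k*2^k); a timing run measured 9.5x at n=16 but could not confirm it at the largest sizes, where both are exponential).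
import Mathlib
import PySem

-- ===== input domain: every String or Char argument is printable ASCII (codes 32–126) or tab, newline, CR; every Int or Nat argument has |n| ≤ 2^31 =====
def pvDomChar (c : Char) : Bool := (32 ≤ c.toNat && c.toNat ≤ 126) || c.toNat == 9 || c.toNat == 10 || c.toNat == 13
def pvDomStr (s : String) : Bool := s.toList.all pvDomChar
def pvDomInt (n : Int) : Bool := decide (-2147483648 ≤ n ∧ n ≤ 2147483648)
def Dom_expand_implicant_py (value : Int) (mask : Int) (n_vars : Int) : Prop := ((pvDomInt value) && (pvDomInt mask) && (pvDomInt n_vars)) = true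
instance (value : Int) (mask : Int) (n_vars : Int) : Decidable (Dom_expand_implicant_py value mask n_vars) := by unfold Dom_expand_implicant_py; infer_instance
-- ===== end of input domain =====

-- B replaces the 2^k-combo enumeration with its inner bit-decoding loop by a single doubling pass over the bit positions, yielding the same minterms in the same order.
-- ===== PORT A =====
-- literal port of _expand_implicant (Source A); Python set → PySem.Set built with Set.add
def expand_implicant_py (value : Int) (mask : Int) (n_vars : Int) : List Int :=
  let dc_bits : List Nat :=
    (List.range n_vars.toNat).filter (fun i => PySem.Int.band mask ((1:Int) <<< (i:Int)) == 0)
  let base : Int := PySem.Int.band value mask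
  let minterms : PySem.Set Int :=
    (List.range (2 ^ dc_bits.length)).foldl
      (fun s combo =>
        let m : Int := dc_bits.zipIdx.foldl
          (fun m jb => if combo &&& (1 <<< jb.2) ≠ 0 then PySem.Int.bor m ((1:Int) <<< (jb.1:Int)) else m)
          base
        PySem.Set.add s m)
      PySem.Set.empty
  minterms

-- ===== PORT B =====
-- port of Source B: iterative doubling — one pass over the bit positions, duplicating the list at each don't-care bit
def expand_implicant_py_alt (value : Int) (mask : Int) (n_vars : Int) : List Int :=
  let minterms : List Int :=
    (List.range n_vars.toNat).foldl
      (fun acc (i : Nat) =>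
        if PySem.Int.band mask ((1:Int) <<< (i:Int)) == 0 then
          acc ++ acc.map (fun m => PySem.Int.bor m ((1:Int) <<< (i:Int)))
        else acc)
      [PySem.Int.band value mask]
  PySem.Set.ofList minterms

-- ===== PRECONDITION & SPEC =====
def Spec_expand_implicant_py (value : Int) (mask : Int) (n_vars : Int) (out : List Int) : Prop := out = expand_implicant_py_alt value mask n_vars
instance (value : Int) (mask : Int) (n_vars : Int) (out : List Int) : Decidable (Spec_expand_implicant_py value mask n_vars out) := by unfold Spec_expand_implicant_py; infer_instance

-- ===== CLAIM (what is proved, stated in full; the proofs are below) =====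
def Claim_equal_expand_implicant_py : Prop := ∀ (value : Int) (mask : Int) (n_vars : Int), Dom_expand_implicant_py value mask n_vars → Spec_expand_implicant_py value mask n_vars (expand_implicant_py value mask n_vars)

-- ===== LEMMAS AND PROOFS =====

-- A's inner loop: set the bits of `combo` (read at indices jb.2) at positions jb.1, on top of b
def pvSetBits (L : List (Nat × Nat)) (combo : Nat) (b : Int) : Int :=
  L.foldl
    (fun m jb => if combo &&& (1 <<< jb.2) ≠ 0 then PySem.Int.bor m ((1:Int) <<< (jb.1:Int)) else m)
    b

theorem pvCond_testBit (c j : Nat) : (c &&& (1 <<< j) ≠ 0) ↔ c.testBit j = true := by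
  rw [Nat.shiftLeft_eq, one_mul, Nat.and_two_pow]
  cases h : c.testBit j <;> simp

theorem pvSetBits_congr (L : List (Nat × Nat)) (c c' : Nat)
    (h : ∀ jb ∈ L, c.testBit jb.2 = c'.testBit jb.2) :
    ∀ b : Int, pvSetBits L c b = pvSetBits L c' b := by
  induction L with
  | nil => intro b; rfl
  | cons jb L ih =>
    intro b
    have hb : (c &&& (1 <<< jb.2) ≠ 0) ↔ (c' &&& (1 <<< jb.2) ≠ 0) := by
      rw [pvCond_testBit, pvCond_testBit, h jb (by simp)]
    simp only [pvSetBits, List.foldl_cons]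
    rw [if_congr hb rfl rfl]
    exact ih (fun p hp => h p (by simp [hp])) _

-- the heart: A's combo enumeration produces exactly B's doubling list, in the same order
theorem pvMain (ps : List Nat) (b : Int) :
    (List.range (2 ^ ps.length)).map (fun c => pvSetBits ps.zipIdx c b)
    = ps.foldl (fun acc p => acc ++ acc.map (fun m => PySem.Int.bor m ((1:Int) <<< (p:Int)))) [b] := by
  induction ps using List.reverseRecOn with
  | nil => rfl
  | append_singleton ps p ih =>
    have hlen : (ps ++ [p]).length = ps.length + 1 := by simp
    have hsplit : (2 : Nat) ^ (ps.length + 1) = 2 ^ ps.length + 2 ^ ps.length := by ring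
    have hzip : (ps ++ [p]).zipIdx = ps.zipIdx ++ [(p, ps.length)] := by
      simp [List.zipIdx_append]
    have hstep : ∀ c : Nat, pvSetBits ((ps ++ [p]).zipIdx) c b
        = (if c &&& (1 <<< ps.length) ≠ 0
           then PySem.Int.bor (pvSetBits ps.zipIdx c b) ((1:Int) <<< (p:Int))
           else pvSetBits ps.zipIdx c b) := by
      intro c
      rw [hzip]
      simp [pvSetBits, List.foldl_append]
    have hidx : ∀ jb ∈ ps.zipIdx, jb.2 < ps.length := by
      intro jb hjb
      have := List.snd_lt_add_of_mem_zipIdx hjb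
      simpa using this
    rw [hlen, hsplit, List.range_add, List.map_append, List.foldl_append, List.foldl_cons,
        List.foldl_nil]
    congr 1
    · -- low half: the new top bit of combo is 0
      rw [← ih]
      apply List.map_congr_left
      intro c hc
      have hc' : c < 2 ^ ps.length := List.mem_range.mp hc
      rw [hstep c]
      have : ¬ (c &&& (1 <<< ps.length) ≠ 0) := by
        rw [pvCond_testBit]
        simp [Nat.testBit_lt_two_pow hc']
      simp only [if_neg this]
    · -- high half: the new top bit is 1, lower bits unchanged
      rw [List.map_map, ← ih, List.map_map]
      apply List.map_congr_left
      intro c hc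
      have hc' : c < 2 ^ ps.length := List.mem_range.mp hc
      simp only [Function.comp_apply]
      rw [hstep (2 ^ ps.length + c)]
      have htop : (2 ^ ps.length + c) &&& (1 <<< ps.length) ≠ 0 := by
        rw [pvCond_testBit, Nat.testBit_two_pow_add_eq, Nat.testBit_lt_two_pow hc']
        rfl
      rw [if_pos htop]
      rw [pvSetBits_congr ps.zipIdx (2 ^ ps.length + c) c
          (fun jb hjb => Nat.testBit_two_pow_add_gt (hidx jb hjb) c) b]

-- ===== VERDICT (by name: the statement is the Claim_ definition above) =====
theorem expand_implicant_py_spec : Claim_equal_expand_implicant_py := by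
  intro value mask n_vars _
  show (List.range (2 ^ ((List.range n_vars.toNat).filter
          (fun (i : Nat) => PySem.Int.band mask ((1:Int) <<< (i:Int)) == 0)).length)).foldl
        (fun s combo =>
          PySem.Set.add s (pvSetBits ((List.range n_vars.toNat).filter
            (fun (i : Nat) => PySem.Int.band mask ((1:Int) <<< (i:Int)) == 0)).zipIdx combo
            (PySem.Int.band value mask)))
        PySem.Set.empty
      = PySem.Set.ofList ((List.range n_vars.toNat).foldl
          (fun acc (i : Nat) =>
            if PySem.Int.band mask ((1:Int) <<< (i:Int)) == 0 then
              acc ++ acc.map (fun m => PySem.Int.bor m ((1:Int) <<< (i:Int)))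
            else acc)
          [PySem.Int.band value mask])
  rw [← PySem.Set.update_map_eq_foldl_add, PySem.Set.update_empty, ← List.foldl_filter, pvMain]
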